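-- pv_equiv track=rewrite | github.com/panrix/icorrect-builds | system-audit-2026-03-31/scripts/n8n_workflow_triage.py | extract_node_types
-- ===== SOURCE A (Python) =====
-- from typing import Any
--
-- def extract_node_types(detail: dict[str, Any]) -> list[str]:
--     out: list[str] = []
--     for node in detail.get("nodes", []):
--         node_type = node.get("type", "")
--         short = node_type.split(".")[-1]
--         if short not in out:
--             out.append(short)
--     return out
-- ===== SOURCE B (Python) =====
-- def extract_node_types(detail):
--     def short(node):
--         return node.get("type", "").split(".")[-1]
--
--     # remove-then-recurse dedup, expressed as a loop: take the head, then
--     # delete all its later duplicates by rebuilding the remainder, repeat.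
--     shorts = [short(node) for node in detail.get("nodes", [])]
--     out = []
--     while shorts:
--         head = shorts[0]
--         out.append(head)
--         shorts = [s for s in shorts[1:] if s != head]
--     return out
-- ===== Notes on version B (the rewrite author's own statement) =====
-- stated objective: alternative
-- what changed: B first maps every node to its suffix, then deduplicates by a remove-then-recurse nub (take the head, rebuild the remainder with all its duplicates filtered out, repeat), instead of A's single accumulator loop that tests 'short not in out' before appending; B maintains no membership test against the output at all.
import Mathlib
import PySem

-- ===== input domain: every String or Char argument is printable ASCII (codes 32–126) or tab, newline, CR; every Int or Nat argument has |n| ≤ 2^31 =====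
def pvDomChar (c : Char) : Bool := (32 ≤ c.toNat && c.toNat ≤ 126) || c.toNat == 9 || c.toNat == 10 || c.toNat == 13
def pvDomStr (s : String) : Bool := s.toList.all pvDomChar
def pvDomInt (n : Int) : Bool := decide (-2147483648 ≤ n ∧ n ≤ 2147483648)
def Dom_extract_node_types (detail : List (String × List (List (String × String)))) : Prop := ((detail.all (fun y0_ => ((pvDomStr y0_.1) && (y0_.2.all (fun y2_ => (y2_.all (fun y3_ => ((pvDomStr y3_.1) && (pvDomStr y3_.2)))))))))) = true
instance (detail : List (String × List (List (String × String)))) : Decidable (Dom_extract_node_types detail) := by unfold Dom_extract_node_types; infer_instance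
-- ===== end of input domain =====

-- B maps every node to its suffix and then deduplicates by a remove-then-recurse nub
-- (keep the head, filter its duplicates out of the tail, recurse), instead of A's
-- accumulator loop with a `short not in out` membership test (alternative algorithm).

-- node.get("type","").split(".")[-1]  (split on a nonempty sep never yields [], so [-1] is total)
def pvShort (node : List (String × String)) : String :=
  PySem.List.pyGetD ((PySem.Str.split? (PySem.Dict.getD (PySem.Dict.mk node) "type" "") ".").getD []) (-1) ""

-- ===== PORT A =====
def extract_node_types (detail : List (String × List (List (String × String)))) : List String :=
  (PySem.Dict.getD (PySem.Dict.mk detail) "nodes" []).foldl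
    (fun out node =>
      let short := pvShort node
      if out.contains short then out else out ++ [short])
    []

-- ===== PORT B =====
-- nub(shorts): keep the head, recurse on the tail with the head's duplicates filtered out
def pvNub : List String → List String
  | [] => []
  | h :: t => h :: pvNub (t.filter (fun s => s ≠ h))
termination_by l => l.length
decreasing_by
  simp only [List.length_unattach, List.length_cons]
  exact Nat.lt_succ_of_le (le_trans (List.length_filter_le _ _) (by simp))

def extract_node_types_alt (detail : List (String × List (List (String × String)))) : List String :=
  pvNub ((PySem.Dict.getD (PySem.Dict.mk detail) "nodes" []).map pvShort)

-- ===== PRECONDITION & SPEC =====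
def Spec_extract_node_types (detail : List (String × List (List (String × String)))) (out : List String) : Prop := out = extract_node_types_alt detail
instance (detail : List (String × List (List (String × String)))) (out : List String) : Decidable (Spec_extract_node_types detail out) := by unfold Spec_extract_node_types; infer_instance

-- ===== CLAIM (what is proved, stated in full; the proofs are below) =====
def Claim_equal_extract_node_types : Prop := ∀ (detail : List (String × List (List (String × String)))), Dom_extract_node_types detail → Spec_extract_node_types detail (extract_node_types detail)

-- ===== LEMMAS AND PROOFS =====

-- equation lemmas for the well-founded pvNub
theorem pvNub_nil : pvNub [] = [] := by rw [pvNub]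
theorem pvNub_cons (h : String) (t : List String) :
    pvNub (h :: t) = h :: pvNub (t.filter (fun s => s ≠ h)) := by rw [pvNub]

-- loop invariant: A's dedup-while-building fold from accumulator `acc` appends exactly
-- the nub of the unseen suffixes of the remaining list
theorem pv_fold_eq_nub (l acc : List String) :
    l.foldl (fun out short => if out.contains short then out else out ++ [short]) acc
      = acc ++ pvNub (l.filter (fun s => !acc.contains s)) := by
  induction l generalizing acc with
  | nil => simp [pvNub_nil]
  | cons h t ih =>
    rw [List.foldl_cons]
    by_cases hc : acc.contains h
    · rw [if_pos hc, ih, List.filter_cons_of_neg (by simpa using hc)]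
    · rw [if_neg hc, ih, List.filter_cons_of_pos (by simpa using hc), pvNub_cons]
      have hfilter : t.filter (fun s => !(acc ++ [h]).contains s)
          = (t.filter (fun s => !acc.contains s)).filter (fun s => s ≠ h) := by
        rw [List.filter_filter]
        apply List.filter_congr
        intro x _
        cases hax : acc.contains x <;> by_cases hx : x = h <;>
          simp_all
      rw [hfilter]
      simp

-- A's fold over nodes equals the fold over their suffixes
theorem pv_foldA_eq_nub (ns : List (List (String × String))) :
    ns.foldl (fun out node =>
        let short := pvShort node
        if out.contains short then out else out ++ [short]) []
      = pvNub (ns.map pvShort) := by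
  calc ns.foldl (fun out node =>
          let short := pvShort node
          if out.contains short then out else out ++ [short]) []
      = (ns.map pvShort).foldl
          (fun out short => if out.contains short then out else out ++ [short]) [] :=
        (List.foldl_map (f := pvShort)
          (g := fun out short => if out.contains short then out else out ++ [short])
          (l := ns) (init := [])).symm
    _ = pvNub (ns.map pvShort) := by rw [pv_fold_eq_nub]; simp

-- ===== VERDICT (by name: the statement is the Claim_ definition above) =====
theorem extract_node_types_spec : Claim_equal_extract_node_types := by
  intro detail _
  unfold Spec_extract_node_types extract_node_types extract_node_types_alt
  rw [pv_foldA_eq_nub]
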